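-- pv_equiv track=rewrite | github.com/pc5401/my_BOJ | 백준/Silver/3986. 좋은 단어/좋은 단어.py | solve
-- ===== SOURCE A (Python) =====
-- def solve(word: str) -> int:
--
--     stack = []
--
--     for w in word:
--         if stack and stack[-1] == w:
--             stack.pop()
--         else:
--             stack.append(w)
--
--     return 0 if stack else 1
-- ===== SOURCE B (Python) =====
-- def solve(word: str) -> int:
--     s = word
--     while True:
--         out = []
--         i = 0
--         while i < len(s):
--             if i + 1 < len(s) and s[i] == s[i + 1]:
--                 i += 2
--             else:
--                 out.append(s[i])
--                 i += 1
--         new = ''.join(out)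
--         if len(new) == len(s):
--             break
--         s = new
--     return 1 if s == '' else 0
-- ===== Notes on version B (the rewrite author's own statement) =====
-- stated objective: alternative
-- what changed: Replaces A's single stack pass with repeated left-to-right scans that delete non-overlapping adjacent equal pairs until a fixed point, then tests emptiness (correct because the pair-deletion rewrite system is confluent).
import Mathlib
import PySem

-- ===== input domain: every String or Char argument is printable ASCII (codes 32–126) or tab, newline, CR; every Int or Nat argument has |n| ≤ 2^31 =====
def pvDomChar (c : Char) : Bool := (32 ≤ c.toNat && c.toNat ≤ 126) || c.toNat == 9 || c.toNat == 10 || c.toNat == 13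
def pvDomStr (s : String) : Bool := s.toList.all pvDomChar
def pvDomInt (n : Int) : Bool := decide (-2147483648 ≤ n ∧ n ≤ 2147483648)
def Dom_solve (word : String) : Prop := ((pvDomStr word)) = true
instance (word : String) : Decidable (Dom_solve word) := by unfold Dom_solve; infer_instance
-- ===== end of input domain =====

-- B is an alternative algorithm of similar cost (repeated pair-deletion scans to a fixed point
-- instead of A's single stack pass); not claimed faster.

-- ===== PORT A =====
-- stack pass: pop the last element when it equals the current char, else append
def solveStack (stack : List Char) (l : List Char) : List Char :=
  match l with
  | [] => stack
  | w :: rest =>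
    if stack ≠ [] ∧ stack.getLast? = some w then solveStack stack.dropLast rest
    else solveStack (stack ++ [w]) rest

def solve (word : String) : Int :=
  if solveStack [] word.toList ≠ [] then 0 else 1

-- ===== PORT B =====
-- one left-to-right scan deleting non-overlapping adjacent equal pairs
def scanOnce : List Char → List Char
  | a :: b :: rest => if a = b then scanOnce rest else a :: scanOnce (b :: rest)
  | l => l

theorem scanOnce_length_le (l : List Char) : (scanOnce l).length ≤ l.length := by
  fun_induction scanOnce l with
  | case1 b rest ih => simp; omega
  | case2 a b rest h ih => simp at *; omega
  | case3 l hx => exact le_refl _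

-- iterate scans until the length stops changing
def loopFix (l : List Char) : List Char :=
  if (scanOnce l).length = l.length then l else loopFix (scanOnce l)
termination_by l.length
decreasing_by
  have := scanOnce_length_le l
  omega

def solve_alt (word : String) : Int :=
  if (loopFix word.toList) = [] then 1 else 0

-- ===== PRECONDITION & SPEC =====
def Spec_solve (word : String) (out : Int) : Prop := out = solve_alt word
instance (word : String) (out : Int) : Decidable (Spec_solve word out) := by unfold Spec_solve; infer_instance

-- ===== CLAIM (what is proved, stated in full; the proofs are below) =====
def Claim_equal_solve : Prop := ∀ (word : String), Dom_solve word → Spec_solve word (solve word)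

-- ===== LEMMAS AND PROOFS =====

-- head-as-top version of the stack pass; related to solveStack by reversal
def stk : List Char → List Char → List Char
  | s, [] => s
  | [], w :: rest => stk [w] rest
  | h :: t, w :: rest => if h = w then stk t rest else stk (w :: h :: t) rest

theorem solveStack_rev (l : List Char) : ∀ s : List Char,
    (solveStack s l).reverse = stk s.reverse l := by
  induction l with
  | nil => intro s; simp [solveStack, stk]
  | cons w rest ih =>
    intro s
    by_cases hc : s ≠ [] ∧ s.getLast? = some w
    · rw [solveStack, if_pos hc]
      obtain ⟨hne, hl⟩ := hc
      obtain ⟨s', a, rfl⟩ := s.eq_nil_or_concat.resolve_left hne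
      have hl' : a = w := by simpa using hl
      subst hl'
      simp only [List.concat_eq_append]
      rw [ih, List.dropLast_concat]
      simp [stk]
    · rw [solveStack, if_neg hc]
      rw [ih]
      rw [not_and] at hc
      rcases s.eq_nil_or_concat with rfl | ⟨s', a, rfl⟩
      · simp [stk]
      · have hne : s'.concat a ≠ [] := by simp [List.concat_eq_append]
        have ha : a ≠ w := by
          intro h
          have := hc hne
          simp [h] at this
        rw [List.concat_eq_append, List.reverse_append]
        simp [stk, ha]

-- a scan pass preserves the stack result, provided the stack has no adjacent duplicates
theorem stk_scanOnce (l : List Char) : ∀ s : List Char, List.IsChain (· ≠ ·) s →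
    stk s (scanOnce l) = stk s l := by
  fun_induction scanOnce l with
  | case1 b rest ih =>
    intro s hs
    rw [ih s hs]
    match s, hs with
    | [], _ => simp [stk]
    | c :: t, hs =>
      by_cases hcb : c = b
      · subst hcb
        match t, hs with
        | [], _ => simp [stk]
        | x :: t', hs =>
          have hxc : x ≠ c := (List.isChain_cons_cons.mp hs).1.symm
          simp [stk, hxc]
      · simp [stk, hcb]
  | case2 a b rest h ih =>
    intro s hs
    match s with
    | [] =>
      simp only [stk]
      exact ih [a] (by simp)
    | c :: t =>
      by_cases hca : c = a
      · simp only [stk, if_pos hca]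
        exact ih t hs.tail
      · simp only [stk, if_neg hca]
        exact ih (a :: c :: t) (List.isChain_cons_cons.mpr ⟨Ne.symm hca, hs⟩)
  | case3 l hx => intro s _; rfl

-- at a fixed point of scanOnce the word has no adjacent equal characters
theorem scanOnce_eq_chain (l : List Char) :
    scanOnce l = l → List.IsChain (· ≠ ·) l := by
  fun_induction scanOnce l with
  | case1 b rest ih =>
    intro h
    exfalso
    have h1 := scanOnce_length_le rest
    have h2 := congrArg List.length h
    simp at h2; omega
  | case2 a b rest hab ih =>
    intro h
    have h' : scanOnce (b :: rest) = b :: rest := by injection h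
    exact List.isChain_cons_cons.mpr ⟨hab, ih h'⟩
  | case3 l hx =>
    intro _
    match l, hx with
    | [], _ => exact List.isChain_nil
    | [a], _ => simp
    | a :: b :: r, hx => exact (hx a b r rfl).elim

theorem scanOnce_len_eq (l : List Char) :
    (scanOnce l).length = l.length → scanOnce l = l := by
  fun_induction scanOnce l with
  | case1 b rest ih =>
    intro h
    exfalso
    have := scanOnce_length_le rest
    simp at h; omega
  | case2 a b rest hab ih =>
    intro h
    simp only [List.length_cons] at h
    rw [ih (by simpa using h)]
  | case3 l hx => intro _; rfl

-- the fixed-point iteration preserves the stack result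
theorem stk_loopFix (l : List Char) : stk [] (loopFix l) = stk [] l := by
  fun_induction loopFix l with
  | case1 l h => rfl
  | case2 l h ih =>
    rw [ih]
    exact stk_scanOnce l [] (by simp)

-- the result of the iteration has no adjacent equal characters
theorem loopFix_chain (l : List Char) : List.IsChain (· ≠ ·) (loopFix l) := by
  fun_induction loopFix l with
  | case1 l h => exact scanOnce_eq_chain l (scanOnce_len_eq l h)
  | case2 l h ih => exact ih

-- on a word with no adjacent equal characters the stack never pops
theorem stk_chain (l : List Char) : ∀ s : List Char,
    (∀ h, s.head? = some h → l.head? ≠ some h) → List.IsChain (· ≠ ·) l →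
    stk s l = l.reverse ++ s := by
  induction l with
  | nil => intro s _ _; simp [stk]
  | cons a rest ih =>
    intro s hs hl
    have hrec : stk (a :: s) rest = rest.reverse ++ (a :: s) := by
      apply ih
      · intro h hh hr
        simp at hh; subst hh
        cases rest with
        | nil => simp at hr
        | cons b t =>
          simp at hr
          exact (List.isChain_cons_cons.mp hl).1 hr.symm
      · exact hl.tail
    match s with
    | [] => simpa [stk] using hrec
    | c :: t =>
      have hca : c ≠ a := fun h => hs c rfl (by simp [h])
      simpa [stk, hca] using hrec

theorem solve_eq (word : String) : solve word = solve_alt word := by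
  unfold solve solve_alt
  have h1 : (solveStack [] word.toList).reverse = stk [] word.toList := by
    simpa using solveStack_rev word.toList []
  have h2 : stk [] word.toList = (loopFix word.toList).reverse := by
    rw [← stk_loopFix]
    simpa using stk_chain (loopFix word.toList) [] (by simp) (loopFix_chain word.toList)
  have key : solveStack [] word.toList = loopFix word.toList :=
    List.reverse_inj.mp (h1.trans h2)
  rw [key]
  by_cases he : loopFix word.toList = [] <;> simp [he]

-- ===== VERDICT (by name: the statement is the Claim_ definition above) =====
theorem solve_spec : Claim_equal_solve := by
  intro word _
  unfold Spec_solve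
  exact solve_eq word
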